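-- pv_equiv track=rewrite | github.com/2001malhar/gridgame | hw1.py | move_brush
-- ===== SOURCE A (Python) =====
-- def move_brush(target_x, target_y, current_pos):
--     commands = []
--     current_x, current_y = current_pos
--     while current_y < target_y:
--         commands.append('s')
--         current_y += 1
--     while current_y > target_y:
--         commands.append('w')
--         current_y -= 1
--     while current_x < target_x:
--         commands.append('d')
--         current_x += 1
--     while current_x > target_x:
--         commands.append('a')
--         current_x -= 1
--     return commands
-- ===== SOURCE B (Python) =====
-- def move_brush(target_x, target_y, current_pos):
--     current_x, current_y = current_pos
--     dy = target_y - current_y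
--     dx = target_x - current_x
--     y_part = ['s'] * dy if dy > 0 else ['w'] * (-dy)
--     x_part = ['d'] * dx if dx > 0 else ['a'] * (-dx)
--     return y_part + x_part
-- ===== Notes on version B (the rewrite author's own statement) =====
-- stated objective: faster
-- what changed: Replaces the four unit-step while loops with a closed-form computation of the step counts (dy, dx) and list repetition, building each direction segment in one allocation.
import Mathlib
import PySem

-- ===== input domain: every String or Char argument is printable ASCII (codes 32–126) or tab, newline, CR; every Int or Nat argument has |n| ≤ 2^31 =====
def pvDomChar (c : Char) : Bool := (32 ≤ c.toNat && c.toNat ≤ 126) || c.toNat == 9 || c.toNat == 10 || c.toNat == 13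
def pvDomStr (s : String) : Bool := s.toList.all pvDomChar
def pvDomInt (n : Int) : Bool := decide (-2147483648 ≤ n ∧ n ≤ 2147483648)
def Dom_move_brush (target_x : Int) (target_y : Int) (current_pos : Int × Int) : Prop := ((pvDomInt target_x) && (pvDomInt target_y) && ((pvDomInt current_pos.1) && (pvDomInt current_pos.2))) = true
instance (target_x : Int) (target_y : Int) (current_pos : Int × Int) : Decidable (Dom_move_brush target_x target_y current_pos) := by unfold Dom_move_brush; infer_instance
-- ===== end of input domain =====

-- B replaces A's four unit-step while loops by closed-form step counts and list repetition (constant-factor faster in Python).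


-- ===== PORT A =====
-- 'while cur < tgt: commands.append(ch); cur += 1'
def mbLoopUp (cur tgt : Int) (ch : String) (acc : List String) : List String :=
  if cur < tgt then mbLoopUp (cur + 1) tgt ch (acc ++ [ch]) else acc
  termination_by (tgt - cur).toNat
  decreasing_by omega

-- 'while cur > tgt: commands.append(ch); cur -= 1'
def mbLoopDown (cur tgt : Int) (ch : String) (acc : List String) : List String :=
  if cur > tgt then mbLoopDown (cur - 1) tgt ch (acc ++ [ch]) else acc
  termination_by (cur - tgt).toNat
  decreasing_by omega

def move_brush (target_x : Int) (target_y : Int) (current_pos : Int × Int) : List String :=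
  let current_x := current_pos.1
  let current_y := current_pos.2
  let commands := mbLoopUp current_y target_y "s" []
  let commands := mbLoopDown current_y target_y "w" commands
  let commands := mbLoopUp current_x target_x "d" commands
  let commands := mbLoopDown current_x target_x "a" commands
  commands

-- ===== PORT B =====
def move_brush_alt (target_x : Int) (target_y : Int) (current_pos : Int × Int) : List String :=
  let dy := target_y - current_pos.2
  let dx := target_x - current_pos.1
  let y_part := if dy > 0 then List.replicate dy.toNat "s" else List.replicate (-dy).toNat "w"
  let x_part := if dx > 0 then List.replicate dx.toNat "d" else List.replicate (-dx).toNat "a"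
  y_part ++ x_part

-- ===== PRECONDITION & SPEC =====
def Spec_move_brush (target_x : Int) (target_y : Int) (current_pos : Int × Int) (out : List String) : Prop := out = move_brush_alt target_x target_y current_pos
instance (target_x : Int) (target_y : Int) (current_pos : Int × Int) (out : List String) : Decidable (Spec_move_brush target_x target_y current_pos out) := by unfold Spec_move_brush; infer_instance

-- ===== CLAIM (what is proved, stated in full; the proofs are below) =====
def Claim_equal_move_brush : Prop := ∀ (target_x : Int) (target_y : Int) (current_pos : Int × Int), Dom_move_brush target_x target_y current_pos → Spec_move_brush target_x target_y current_pos (move_brush target_x target_y current_pos)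

-- ===== LEMMAS AND PROOFS =====
theorem mbLoopUp_eq (cur tgt : Int) (ch : String) (acc : List String) :
    mbLoopUp cur tgt ch acc = acc ++ List.replicate (tgt - cur).toNat ch := by
  by_cases h : cur < tgt
  · rw [mbLoopUp, if_pos h, mbLoopUp_eq (cur + 1) tgt ch]
    have : (tgt - cur).toNat = (tgt - (cur + 1)).toNat + 1 := by omega
    rw [this, List.replicate_succ, List.append_assoc]
    rfl
  · rw [mbLoopUp, if_neg h]
    have : (tgt - cur).toNat = 0 := by omega
    simp [this]
  termination_by (tgt - cur).toNat
  decreasing_by omega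

theorem mbLoopDown_eq (cur tgt : Int) (ch : String) (acc : List String) :
    mbLoopDown cur tgt ch acc = acc ++ List.replicate (cur - tgt).toNat ch := by
  by_cases h : cur > tgt
  · rw [mbLoopDown, if_pos h, mbLoopDown_eq (cur - 1) tgt ch]
    have : (cur - tgt).toNat = (cur - 1 - tgt).toNat + 1 := by omega
    rw [this, List.replicate_succ, List.append_assoc]
    rfl
  · rw [mbLoopDown, if_neg h]
    have : (cur - tgt).toNat = 0 := by omega
    simp [this]
  termination_by (cur - tgt).toNat
  decreasing_by omega

-- ===== VERDICT (by name: the statement is the Claim_ definition above) =====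
theorem move_brush_spec : Claim_equal_move_brush := by
  intro tx ty cp _
  obtain ⟨cx, cy⟩ := cp
  unfold Spec_move_brush move_brush move_brush_alt
  simp only [mbLoopUp_eq, mbLoopDown_eq, List.nil_append, List.append_assoc]
  by_cases hy : ty - cy > 0 <;> by_cases hx : tx - cx > 0 <;>
    simp only [hy, hx, if_true, if_false] <;>
    first
    | (have h1 : (cy - ty).toNat = 0 := by omega
       have h2 : (cx - tx).toNat = 0 := by omega
       simp [h1, h2])
    | (have h1 : (cy - ty).toNat = 0 := by omega
       have h2 : (tx - cx).toNat = 0 := by omega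
       simp [h1, h2])
    | (have h1 : (ty - cy).toNat = 0 := by omega
       have h2 : (cx - tx).toNat = 0 := by omega
       simp [h1, h2])
    | (have h1 : (ty - cy).toNat = 0 := by omega
       have h2 : (tx - cx).toNat = 0 := by omega
       simp [h1, h2])
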